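-- pv_equiv track=rewrite | github.com/Deployia/deployio | ai-service/engines/enhancers/llm_enhancer.py | _enhance_java_analysis
-- ===== SOURCE A (Python) =====
-- from typing import Dict, List, Optional, Any, Tuple
--
-- def _enhance_java_analysis(
--     repository_files: Dict[str, str]
-- ) -> Tuple[List[str], List[Dict]]:
--     """Enhance Java analysis"""
--     insights = []
--     recommendations = []
--
--     # Check for build files
--     has_maven = any("pom.xml" in path for path in repository_files.keys())
--     has_gradle = any("build.gradle" in path for path in repository_files.keys())
--
--     if has_maven:
--         insights.append("Maven build system detected")
--         recommendations.append(
--             {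
--                 "type": "build_optimization",
--                 "suggestion": "Use Maven wrapper for consistent builds across environments",
--                 "priority": "medium",
--             }
--         )
--
--     if has_gradle:
--         insights.append("Gradle build system detected")
--         recommendations.append(
--             {
--                 "type": "build_optimization",
--                 "suggestion": "Use Gradle wrapper and consider build caching",
--                 "priority": "medium",
--             }
--         )
--
--     # Check for Spring framework
--     file_contents = " ".join(
--         [
--             str(val) if isinstance(val, str) else ""
--             for val in repository_files.values()
--         ]
--     ).lower()
--     if "spring" in file_contents:
--         insights.append("Spring framework detected")
--         recommendations.append(
--             {
--                 "type": "deployment",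
--                 "suggestion": "Use Spring Boot for simplified deployment",
--                 "priority": "high",
--             }
--         )
--
--     return insights, recommendations
-- ===== SOURCE B (Python) =====
-- from typing import Dict, List, Tuple
--
-- def _enhance_java_analysis(
--     repository_files: Dict[str, str]
-- ) -> Tuple[List[str], List[Dict]]:
--     """Enhance Java analysis (single fused pass over the files)."""
--     has_maven = has_gradle = has_spring = False
--     for path, val in repository_files.items():
--         has_maven = has_maven or "pom.xml" in path
--         has_gradle = has_gradle or "build.gradle" in path
--         has_spring = has_spring or (isinstance(val, str) and "spring" in val.lower())
--
--     insights = []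
--     recommendations = []
--     if has_maven:
--         insights.append("Maven build system detected")
--         recommendations.append(
--             {
--                 "type": "build_optimization",
--                 "suggestion": "Use Maven wrapper for consistent builds across environments",
--                 "priority": "medium",
--             }
--         )
--     if has_gradle:
--         insights.append("Gradle build system detected")
--         recommendations.append(
--             {
--                 "type": "build_optimization",
--                 "suggestion": "Use Gradle wrapper and consider build caching",
--                 "priority": "medium",
--             }
--         )
--     if has_spring:
--         insights.append("Spring framework detected")
--         recommendations.append(
--             {
--                 "type": "deployment",
--                 "suggestion": "Use Spring Boot for simplified deployment",
--                 "priority": "high",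
--             }
--         )
--     return insights, recommendations
-- ===== Notes on version B (the rewrite author's own statement) =====
-- stated objective: alternative
-- what changed: B computes all three detection flags in one fused OR-accumulating pass over the items, instead of A's two any()-scans over the keys plus building and lowercasing one big space-joined string of all values.
import Mathlib
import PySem

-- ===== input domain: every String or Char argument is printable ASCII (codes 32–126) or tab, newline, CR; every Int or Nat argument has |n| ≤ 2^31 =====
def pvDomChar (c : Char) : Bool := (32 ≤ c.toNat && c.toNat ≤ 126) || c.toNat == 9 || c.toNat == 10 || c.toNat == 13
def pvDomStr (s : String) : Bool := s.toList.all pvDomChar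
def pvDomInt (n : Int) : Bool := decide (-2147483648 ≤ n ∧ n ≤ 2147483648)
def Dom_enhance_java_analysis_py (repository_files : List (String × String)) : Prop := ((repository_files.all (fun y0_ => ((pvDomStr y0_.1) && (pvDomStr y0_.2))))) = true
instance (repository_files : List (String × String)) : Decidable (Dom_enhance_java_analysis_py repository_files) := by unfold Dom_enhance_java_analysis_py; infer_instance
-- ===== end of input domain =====

-- B fuses A's three separate detection scans (two any() passes over the keys and one
-- space-join + lower of all values) into a single OR-accumulating pass over the items
-- (objective: alternative decomposition; no joined copy of the contents is built).


def mavenInsight : String := "Maven build system detected"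
def mavenRec : List (String × String) :=
  [("type", "build_optimization"),
   ("suggestion", "Use Maven wrapper for consistent builds across environments"),
   ("priority", "medium")]
def gradleInsight : String := "Gradle build system detected"
def gradleRec : List (String × String) :=
  [("type", "build_optimization"),
   ("suggestion", "Use Gradle wrapper and consider build caching"),
   ("priority", "medium")]
def springInsight : String := "Spring framework detected"
def springRec : List (String × String) :=
  [("type", "deployment"),
   ("suggestion", "Use Spring Boot for simplified deployment"),
   ("priority", "high")]

-- ===== PORT A =====
-- literal transliteration of A: two any()-scans over the keys, then the values are
-- space-joined, lowered and searched once for "spring" (isinstance(val, str) is always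
-- true for a dict[str, str], so the comprehension keeps every value as-is).
def enhance_java_analysis_py (repository_files : List (String × String)) : List String × (List (List (String × String))) :=
  let has_maven := repository_files.any (fun kv => PySem.Str.isIn "pom.xml" kv.1)
  let has_gradle := repository_files.any (fun kv => PySem.Str.isIn "build.gradle" kv.1)
  let insights₁ : List String := []
  let recommendations₁ : List (List (String × String)) := []
  let insights₂ := if has_maven then insights₁ ++ [mavenInsight] else insights₁
  let recommendations₂ := if has_maven then recommendations₁ ++ [mavenRec] else recommendations₁
  let insights₃ := if has_gradle then insights₂ ++ [gradleInsight] else insights₂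
  let recommendations₃ := if has_gradle then recommendations₂ ++ [gradleRec] else recommendations₂
  let file_contents := PySem.Str.lower (PySem.Str.join " " (repository_files.map (fun kv => kv.2)))
  if PySem.Str.isIn "spring" file_contents then
    (insights₃ ++ [springInsight], recommendations₃ ++ [springRec])
  else
    (insights₃, recommendations₃)

-- ===== PORT B =====
-- transliteration of B: one fused fold over the items, OR-accumulating the three flags.
def enhance_java_analysis_py_alt (repository_files : List (String × String)) : List String × (List (List (String × String))) :=
  let flags :=
    repository_files.foldl
      (fun (acc : Bool × Bool × Bool) kv =>
        (acc.1 || PySem.Str.isIn "pom.xml" kv.1,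
         acc.2.1 || PySem.Str.isIn "build.gradle" kv.1,
         acc.2.2 || PySem.Str.isIn "spring" (PySem.Str.lower kv.2)))
      (false, false, false)
  let insights₁ : List String := if flags.1 then [mavenInsight] else []
  let recs₁ : List (List (String × String)) := if flags.1 then [mavenRec] else []
  let insights₂ := if flags.2.1 then insights₁ ++ [gradleInsight] else insights₁
  let recs₂ := if flags.2.1 then recs₁ ++ [gradleRec] else recs₁
  if flags.2.2 then (insights₂ ++ [springInsight], recs₂ ++ [springRec])
  else (insights₂, recs₂)

-- ===== PRECONDITION & SPEC =====
def Spec_enhance_java_analysis_py (repository_files : List (String × String)) (out : List String × (List (List (String × String)))) : Prop := out = enhance_java_analysis_py_alt repository_files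
instance (repository_files : List (String × String)) (out : List String × (List (List (String × String)))) : Decidable (Spec_enhance_java_analysis_py repository_files out) := by unfold Spec_enhance_java_analysis_py; infer_instance

-- ===== CLAIM (what is proved, stated in full; the proofs are below) =====
def Claim_equal_enhance_java_analysis_py : Prop := ∀ (repository_files : List (String × String)), Dom_enhance_java_analysis_py repository_files → Spec_enhance_java_analysis_py repository_files (enhance_java_analysis_py repository_files)

-- ===== LEMMAS AND PROOFS =====

-- The fused fold computes exactly the three any()-style flags.
theorem foldl_flags (p q r : String × String → Bool) (xs : List (String × String)) (a b c : Bool) :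
    xs.foldl (fun (acc : Bool × Bool × Bool) kv =>
        (acc.1 || p kv, acc.2.1 || q kv, acc.2.2 || r kv)) (a, b, c)
      = (a || xs.any p, b || xs.any q, c || xs.any r) := by
  induction xs generalizing a b c with
  | nil => simp
  | cons x xs ih => simp [List.foldl_cons, ih, Bool.or_assoc]

-- If c does not occur in p, a prefix of a ++ c :: b that avoids c is a prefix of a.
theorem prefix_avoid {α : Type} {p a b : List α} {c : α}
    (hc : c ∉ p) (h : p <+: a ++ c :: b) : p <+: a := by
  induction p generalizing a with
  | nil => exact List.nil_prefix
  | cons q p' ih =>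
    cases a with
    | nil =>
      rw [List.nil_append, List.cons_prefix_cons] at h
      obtain ⟨he, -⟩ := h
      subst he
      exact absurd List.mem_cons_self hc
    | cons x a' =>
      rw [List.cons_append, List.cons_prefix_cons] at h
      exact List.cons_prefix_cons.mpr ⟨h.1, ih (fun hm => hc (List.mem_cons_of_mem _ hm)) h.2⟩

-- If c does not occur in p, an infix of a ++ c :: b is an infix of a or of b.
theorem infix_avoid {α : Type} {p a b : List α} {c : α}
    (hc : c ∉ p) (h : p <:+: a ++ c :: b) : p <:+: a ∨ p <:+: b := by
  induction a with
  | nil =>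
    rw [List.nil_append, List.infix_cons_iff] at h
    cases h with
    | inl hp =>
      cases p with
      | nil => exact Or.inr List.nil_infix
      | cons q p' =>
        rw [List.cons_prefix_cons] at hp
        obtain ⟨he, -⟩ := hp
        subst he
        exact absurd List.mem_cons_self hc
    | inr hi => exact Or.inr hi
  | cons x a' ih =>
    rw [List.cons_append, List.infix_cons_iff] at h
    cases h with
    | inl hp =>
      exact Or.inl (prefix_avoid hc (by simpa using hp)).isInfix
    | inr hi =>
      rcases ih hi with h1 | h2
      · exact Or.inl (h1.trans (List.suffix_cons x a').isInfix)
      · exact Or.inr h2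

-- "spring" occurs in the space-joined list iff it occurs in one of the pieces
-- (it contains no space, so it cannot span a join boundary).
theorem isIn_spring_intercalate (ls : List (List Char)) :
    PySem.Chars.isIn "spring".toList ([' '].intercalate ls)
      = ls.any (fun l => PySem.Chars.isIn "spring".toList l) := by
  induction ls with
  | nil => decide
  | cons l ls ih =>
    cases ls with
    | nil => simp [List.intercalate]
    | cons l' ls' =>
      have hstep : [' '].intercalate (l :: l' :: ls') = l ++ ' ' :: [' '].intercalate (l' :: ls') := by
        simp [List.intercalate]
      rw [hstep]
      rcases Bool.eq_false_or_eq_true (PySem.Chars.isIn "spring".toList (l ++ ' ' :: [' '].intercalate (l' :: ls'))) with hT | hF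
      · rw [hT]
        rw [PySem.Chars.isIn_iff_infix] at hT
        rcases infix_avoid (by decide) hT with h1 | h2
        · rw [List.any_cons, (PySem.Chars.isIn_iff_infix _ _).mpr h1, Bool.true_or]
        · rw [List.any_cons, ← ih, (PySem.Chars.isIn_iff_infix _ _).mpr h2, Bool.or_true]
      · rw [hF]
        rw [PySem.Chars.isIn_eq_false_iff] at hF
        have hl : PySem.Chars.isIn "spring".toList l = false := by
          rw [PySem.Chars.isIn_eq_false_iff]
          exact fun hi => hF (hi.trans (List.prefix_append _ _).isInfix)
        have hr : (l' :: ls').any (fun l => PySem.Chars.isIn "spring".toList l) = false := by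
          rw [← ih, PySem.Chars.isIn_eq_false_iff]
          intro hi
          exact hF ((hi.trans (List.suffix_cons ' ' _).isInfix).trans (List.suffix_append l _).isInfix)
        rw [List.any_cons, hl, hr, Bool.false_or]

-- lowering maps over the intercalation (it is characterwise).
theorem map_lowerChar_intercalate (ls : List (List Char)) :
    List.map PySem.Chars.lowerChar ([' '].intercalate ls)
      = [' '].intercalate (ls.map (List.map PySem.Chars.lowerChar)) := by
  induction ls with
  | nil => decide
  | cons l ls ih =>
    cases ls with
    | nil => simp [List.intercalate]
    | cons l' ls' =>
      have h1 : [' '].intercalate (l :: l' :: ls') = l ++ ' ' :: [' '].intercalate (l' :: ls') := by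
        simp [List.intercalate]
      have h2 : [' '].intercalate ((l :: l' :: ls').map (List.map PySem.Chars.lowerChar))
          = List.map PySem.Chars.lowerChar l ++ ' ' :: [' '].intercalate ((l' :: ls').map (List.map PySem.Chars.lowerChar)) := by
        simp [List.intercalate]
      rw [h1, h2, List.map_append, ← ih]
      have : PySem.Chars.lowerChar ' ' = ' ' := by decide
      simp [this]

-- lowering distributes over the space-join (lowerChar ' ' = ' ').
theorem lower_join (vs : List String) :
    PySem.Chars.lower (PySem.Str.join " " vs).toList
      = [' '].intercalate (vs.map (fun v => PySem.Chars.lower v.toList)) := by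
  rw [PySem.Str.toList_join]
  have hsp : (" " : String).toList = [' '] := by decide
  unfold PySem.Chars.join PySem.Chars.lower
  rw [hsp, map_lowerChar_intercalate, List.map_map]
  rfl

-- A's joined-and-lowered search equals B's per-value search.
theorem spring_flag (xs : List (String × String)) :
    PySem.Str.isIn "spring" (PySem.Str.lower (PySem.Str.join " " (xs.map (fun kv => kv.2))))
      = xs.any (fun kv => PySem.Str.isIn "spring" (PySem.Str.lower kv.2)) := by
  simp only [PySem.Str.isIn_eq, lower_join, isIn_spring_intercalate, List.map_map,
    List.any_map, PySem.Str.toList_lower]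
  rfl

-- ===== VERDICT (by name: the statement is the Claim_ definition above) =====
theorem enhance_java_analysis_py_spec : Claim_equal_enhance_java_analysis_py := by
  intro xs _
  unfold Spec_enhance_java_analysis_py
  simp only [enhance_java_analysis_py, enhance_java_analysis_py_alt, foldl_flags, spring_flag,
    Bool.false_or]
  rcases Bool.eq_false_or_eq_true (xs.any (fun kv => PySem.Str.isIn "pom.xml" kv.1)) with hm | hm <;>
  rcases Bool.eq_false_or_eq_true (xs.any (fun kv => PySem.Str.isIn "build.gradle" kv.1)) with hg | hg <;>
  rcases Bool.eq_false_or_eq_true (xs.any (fun kv => PySem.Str.isIn "spring" (PySem.Str.lower kv.2))) with hs | hs <;>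
  rw [hm, hg, hs] <;> simp
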